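-- pv_equiv track=rewrite | github.com/casellimarco/codejam | 22/1A/1.py | solve
-- ===== SOURCE A (Python) =====
-- def solve(word):
--     count = []
--     previous = None
--     for letter in word:
--         if previous == letter:
--             count[-1][-1] += 1
--         else:
--             count.append([letter, 1])
--         previous = letter
--     sol = ""
--     for i, c in enumerate(count[:-1]):
--         sol += c[0]*c[1]
--         if c[0] < count[i+1][0]:
--             sol += c[0]*c[1]
--     sol += count[-1][0]*count[-1][1]
--
--     return sol
-- ===== SOURCE B (Python) =====
-- def solve(word):
--     run_char = word[0]
--     run_len = 0
--     sol = ""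
--     for letter in word:
--         if letter == run_char:
--             run_len += 1
--         else:
--             piece = run_char * run_len
--             sol += piece
--             if run_char < letter:
--                 sol += piece
--             run_char = letter
--             run_len = 1
--     return sol + run_char * run_len
-- ===== Notes on version B (the rewrite author's own statement) =====
-- stated objective: alternative
-- what changed: B fuses A's two passes (build an explicit run-length list, then re-scan it with index lookahead) into one forward pass that flushes each finished run directly, never materialising the run list.
import Mathlib
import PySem

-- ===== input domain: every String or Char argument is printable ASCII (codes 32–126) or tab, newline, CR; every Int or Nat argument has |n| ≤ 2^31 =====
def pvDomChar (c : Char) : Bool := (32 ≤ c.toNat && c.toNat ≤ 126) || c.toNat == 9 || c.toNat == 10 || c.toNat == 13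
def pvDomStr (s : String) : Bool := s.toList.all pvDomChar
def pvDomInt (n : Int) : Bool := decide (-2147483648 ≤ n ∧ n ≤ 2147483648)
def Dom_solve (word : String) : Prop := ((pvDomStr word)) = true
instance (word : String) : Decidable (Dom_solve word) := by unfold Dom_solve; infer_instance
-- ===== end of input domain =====

-- B fuses A's two passes (RLE list, then re-scan with index lookahead) into one flushing pass; same O(n) cost.

-- ===== PORT A =====
-- count[-1][-1] += 1  (only reached when count is nonempty, since previous == letter)
def pvIncLast (cs : List (Char × Int)) : List (Char × Int) :=
  match cs with
  | [] => []
  | [(c, n)] => [(c, n + 1)]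
  | x :: rest => x :: pvIncLast rest

-- first loop of A: builds count (as (letter, count) pairs) and previous
def pvLoop1 (letters : List Char) (st : List (Char × Int) × Option Char) :
    List (Char × Int) × Option Char :=
  letters.foldl (fun st letter =>
    (if st.2 = some letter then pvIncLast st.1 else st.1 ++ [(letter, 1)], some letter)) st

-- the body of A's second loop: sol += c[0]*c[1]; if c[0] < count[i+1][0]: sol += c[0]*c[1]
-- (the count[i+1] lookup is always in range; the default pair is unreachable)
def pvBody (count : List (Char × Int)) (sol : List Char) (ic : Int × (Char × Int)) : List Char :=
  let piece := PySem.List.pyRepeat [ic.2.1] ic.2.2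
  sol ++ piece ++
    (if ic.2.1 < (PySem.List.pyGetD count (ic.1 + 1) ('a', 0)).1 then piece else [])

def solve (word : String) : String :=
  let count := (pvLoop1 word.toList ([], none)).1
  -- count[:-1] = dropLast (exact, incl. the empty list); sol is built as a char list
  let sol := (PySem.List.enumerate count.dropLast 0).foldl (pvBody count) []
  -- count[-1]: raises IndexError on empty count (empty word) — excluded by Pre_solve
  let last := PySem.List.pyGetD count (-1) ('a', 0)
  String.mk (sol ++ PySem.List.pyRepeat [last.1] last.2)

-- ===== PORT B =====
-- B's single fused loop: state (run_char, run_len, sol)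
def pvAltLoop (letters : List Char) (st : Char × Int × List Char) : Char × Int × List Char :=
  letters.foldl (fun st letter =>
    if letter = st.1 then (st.1, st.2.1 + 1, st.2.2)
    else
      let piece := PySem.List.pyRepeat [st.1] st.2.1
      (letter, 1, st.2.2 ++ piece ++ (if st.1 < letter then piece else []))) st

def solve_alt (word : String) : String :=
  match word.toList with
  | [] => ""   -- word[0] raises IndexError in Python: excluded by Pre_solve
  | c0 :: _ =>
    let st := pvAltLoop word.toList (c0, 0, [])
    String.mk (st.2.2 ++ PySem.List.pyRepeat [st.1] st.2.1)

-- ===== PRECONDITION & SPEC =====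
-- A raises IndexError on the empty string (count[-1] on the empty run list); B raises there too (word[0]).
def Pre_solve (word : String) : Prop := word ≠ ""
instance (word : String) : Decidable (Pre_solve word) := by unfold Pre_solve; infer_instance
def pvWitness_solve : String := "aabba"

def Spec_solve (word : String) (out : String) : Prop := out = solve_alt word
instance (word : String) (out : String) : Decidable (Spec_solve word out) := by unfold Spec_solve; infer_instance

-- ===== CLAIM (what is proved, stated in full; the proofs are below) =====
def Claim_equal_solve : Prop := ∀ (word : String), Dom_solve word → Pre_solve word → Spec_solve word (solve word)

-- ===== LEMMAS AND PROOFS =====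

-- the run-length encoding of letters, continuing a current run (p, n), as a recursive spec
def pvRuns (p : Char) (n : Int) : List Char → List (Char × Int)
  | [] => [(p, n)]
  | c :: cs => if c = p then pvRuns p (n + 1) cs else (p, n) :: pvRuns c 1 cs

-- the intended emission over the run list
def pvEmit : List (Char × Int) → List Char
  | [] => []
  | [(c, n)] => PySem.List.pyRepeat [c] n
  | (c, n) :: (d, m) :: rest =>
      PySem.List.pyRepeat [c] n ++
        (if c < d then PySem.List.pyRepeat [c] n else []) ++ pvEmit ((d, m) :: rest)

theorem pvRuns_head (p : Char) (n : Int) (cs : List Char) :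
    ∃ k t, pvRuns p n cs = (p, k) :: t := by
  induction cs generalizing n with
  | nil => exact ⟨n, [], rfl⟩
  | cons c cs ih =>
    simp only [pvRuns]
    split
    · exact ih (n + 1)
    · exact ⟨n, _, rfl⟩

theorem pvIncLast_append (acc : List (Char × Int)) (p : Char) (n : Int) :
    pvIncLast (acc ++ [(p, n)]) = acc ++ [(p, n + 1)] := by
  induction acc with
  | nil => rfl
  | cons x acc ih =>
    cases acc with
    | nil => rfl
    | cons y t => simpa [pvIncLast] using ih

theorem pvLoop1_runs (cs : List Char) (acc : List (Char × Int)) (p : Char) (n : Int) :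
    (pvLoop1 cs (acc ++ [(p, n)], some p)).1 = acc ++ pvRuns p n cs := by
  induction cs generalizing acc p n with
  | nil => simp [pvLoop1, pvRuns]
  | cons c cs ih =>
    by_cases h : c = p
    · subst h
      have ihh := ih acc c (n + 1)
      simp only [pvLoop1, List.foldl_cons] at ihh ⊢
      simp only [pvRuns, if_pos rfl]
      simpa [pvIncLast_append] using ihh
    · have ihh := ih (acc ++ [(p, n)]) c 1
      simp only [pvLoop1, List.foldl_cons] at ihh ⊢
      simp only [pvRuns, if_neg h]
      have hne : ¬ (some p = some c) := fun hx => h (Option.some.inj hx).symm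
      simpa [hne, List.append_assoc] using ihh

theorem pvBody_cons (x : Char × Int) (rest : List (Char × Int)) (s : Int) (hs : 0 ≤ s)
    (sol : List Char) (y : Char × Int) :
    pvBody (x :: rest) sol (s + 1, y) = pvBody rest sol (s, y) := by
  obtain ⟨k, rfl⟩ : ∃ k : Nat, s = (k : Int) := ⟨s.toNat, (Int.toNat_of_nonneg hs).symm⟩
  have hidx : PySem.List.pyGetD (x :: rest) ((k : Int) + 1 + 1) ('a', 0)
      = PySem.List.pyGetD rest ((k : Int) + 1) ('a', 0) := by
    have h1 : ((k : Int) + 1 + 1) = ((k + 2 : Nat) : Int) := by push_cast; ring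
    have h2 : ((k : Int) + 1) = ((k + 1 : Nat) : Int) := by push_cast; ring
    rw [h1, h2, PySem.List.pyGetD_natCast, PySem.List.pyGetD_natCast]
    simp [List.getD]
  simp [pvBody, hidx]

-- index-shift: consuming the head of count shifts the lookahead index down by one
theorem pvPhase2_shift (x : Char × Int) (rest : List (Char × Int)) (l : List (Char × Int))
    (s : Int) (hs : 0 ≤ s) (sol : List Char) :
    (PySem.List.enumerate l (s + 1)).foldl (pvBody (x :: rest)) sol
    = (PySem.List.enumerate l s).foldl (pvBody rest) sol := by
  induction l generalizing s sol with
  | nil => simp [PySem.List.enumerate]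
  | cons y l ih =>
    rw [PySem.List.enumerate_cons, PySem.List.enumerate_cons, List.foldl_cons, List.foldl_cons,
        pvBody_cons x rest s hs sol y]
    exact ih (s + 1) (by omega) _

-- A's second phase equals pvEmit on a nonempty run list
theorem pvPhase2_emit (count : List (Char × Int)) (hne : count ≠ []) (sol : List Char) :
    (PySem.List.enumerate count.dropLast 0).foldl (pvBody count) sol
      ++ PySem.List.pyRepeat [(PySem.List.pyGetD count (-1) ('a', 0)).1]
           (PySem.List.pyGetD count (-1) ('a', 0)).2
    = sol ++ pvEmit count := by
  induction count generalizing sol with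
  | nil => exact absurd rfl hne
  | cons x rest ih =>
    cases rest with
    | nil =>
      obtain ⟨c, n⟩ := x
      simp [PySem.List.enumerate, pvEmit, PySem.List.pyGetD_neg_one]
    | cons y t =>
      have hd : (x :: y :: t).dropLast = x :: (y :: t).dropLast := rfl
      rw [hd, PySem.List.enumerate_cons, List.foldl_cons,
          pvPhase2_shift x (y :: t) ((y :: t).dropLast) 0 le_rfl _]
      have hlast : PySem.List.pyGetD (x :: y :: t) (-1) ('a', 0)
          = PySem.List.pyGetD (y :: t) (-1) ('a', 0) := by
        rw [PySem.List.pyGetD_neg_one (x :: y :: t) ('a', 0) (by simp),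
            PySem.List.pyGetD_neg_one (y :: t) ('a', 0) (by simp)]
        simp [List.getLast]
      rw [hlast, ih (by simp) _]
      have h0 : PySem.List.pyGetD (x :: y :: t) (1 : Int) ('a', 0) = y := by
        rw [show (1 : Int) = ((1 : Nat) : Int) by norm_num, PySem.List.pyGetD_natCast]; rfl
      obtain ⟨c, n⟩ := x
      obtain ⟨d, m⟩ := y
      simp [pvBody, pvEmit, List.append_assoc]
      rw [h0]

-- B's fused loop emits pvEmit of the runs
theorem pvAltLoop_emit (cs : List Char) (p : Char) (n : Int) (sol : List Char) :
    (pvAltLoop cs (p, n, sol)).2.2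
      ++ PySem.List.pyRepeat [(pvAltLoop cs (p, n, sol)).1] (pvAltLoop cs (p, n, sol)).2.1
    = sol ++ pvEmit (pvRuns p n cs) := by
  induction cs generalizing p n sol with
  | nil => simp [pvAltLoop, pvRuns, pvEmit]
  | cons c cs ih =>
    by_cases h : c = p
    · subst h
      have ihh := ih c (n + 1) sol
      simp only [pvAltLoop, List.foldl_cons] at ihh ⊢
      simp only [pvRuns, if_pos rfl]
      simpa using ihh
    · obtain ⟨k, t, hruns⟩ := pvRuns_head c 1 cs
      have ihh := ih c 1 (sol ++ PySem.List.pyRepeat [p] n ++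
        (if p < c then PySem.List.pyRepeat [p] n else []))
      simp only [pvAltLoop, List.foldl_cons] at ihh ⊢
      simp only [pvRuns, if_neg h]
      rw [hruns] at ihh ⊢
      simpa [h, pvEmit, List.append_assoc] using ihh

-- ===== VERDICT (by name: the statement is the Claim_ definition above) =====
theorem solve_spec : Claim_equal_solve := by
  intro word _ hpre
  unfold Spec_solve
  cases hcs : word.toList with
  | nil => exact absurd (String.toList_eq_nil_iff.mp hcs) hpre
  | cons c0 cs =>
    have hA1 : (pvLoop1 (c0 :: cs) ([], none)).1 = pvRuns c0 1 cs := by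
      have h := pvLoop1_runs cs [] c0 1
      simp only [List.nil_append] at h
      simp only [pvLoop1, List.foldl_cons] at h ⊢
      simpa using h
    obtain ⟨k, t, hruns⟩ := pvRuns_head c0 1 cs
    have hcne : pvRuns c0 1 cs ≠ [] := by rw [hruns]; simp
    have hB1 := pvAltLoop_emit cs c0 1 []
    have h1 : pvAltLoop (c0 :: cs) (c0, 0, []) = pvAltLoop cs (c0, 1, []) := by
      simp [pvAltLoop]
    simp only [solve, solve_alt, hcs]
    rw [hA1, pvPhase2_emit (pvRuns c0 1 cs) hcne [], h1]
    simp only [List.nil_append] at hB1 ⊢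
    exact congrArg String.mk hB1.symm
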